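-- pv_equiv track=rewrite | github.com/monicagiraldochica/random | ldap_tests/myldaplib.py | find_duplicate_uids
-- ===== SOURCE A (Python) =====
-- def find_duplicate_uids(users):
--     duplicate_uids = {}
--     seen_uids = set()
--     for user, uid in users.items():
--         if uid in seen_uids:
--             if uid not in duplicate_uids:
--                 duplicate_uids[uid] = [user]
--             else:
--                 duplicate_uids[uid].append(user)
--         else:
--             seen_uids.add(uid)
--     return duplicate_uids
-- ===== SOURCE B (Python) =====
-- def find_duplicate_uids(users):
--     # Two staged passes instead of A's incremental seen/duplicate bookkeeping:
--     # pass 1 records each uid's first-occurrence index; pass 2 groups every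
--     # non-first holder with a single setdefault-append.
--     items = list(users.items())
--     first = {}
--     for i, (user, uid) in enumerate(items):
--         first.setdefault(uid, i)
--     dups = {}
--     for i, (user, uid) in enumerate(items):
--         if i != first[uid]:
--             dups.setdefault(uid, []).append(user)
--     return dups
-- ===== Notes on version B (the rewrite author's own statement) =====
-- stated objective: alternative
-- what changed: Replaces A's single pass with incremental seen-set/duplicate-dict bookkeeping by two staged passes: pass 1 records each uid's first-occurrence index in a dict, pass 2 appends every user whose index differs from that first index via one setdefault-append.
import Mathlib
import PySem

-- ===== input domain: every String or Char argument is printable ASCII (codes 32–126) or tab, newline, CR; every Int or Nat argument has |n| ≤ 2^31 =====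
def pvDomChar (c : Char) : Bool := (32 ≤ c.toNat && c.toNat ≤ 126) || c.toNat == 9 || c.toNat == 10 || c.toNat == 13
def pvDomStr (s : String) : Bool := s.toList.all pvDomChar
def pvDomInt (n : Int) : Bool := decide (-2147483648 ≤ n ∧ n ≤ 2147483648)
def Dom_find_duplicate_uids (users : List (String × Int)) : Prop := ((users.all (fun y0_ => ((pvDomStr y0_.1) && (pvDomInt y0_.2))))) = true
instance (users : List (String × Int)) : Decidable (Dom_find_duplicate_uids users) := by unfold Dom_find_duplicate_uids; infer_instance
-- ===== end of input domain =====

-- B replaces A's incremental seen-set/duplicate bookkeeping by two staged passes: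
-- pass 1 records each uid's first-occurrence index, pass 2 groups every non-first
-- holder with one setdefault-append (alternative decomposition, same cost).
-- A mutates nothing observable; equivalence is about the return value.


-- ===== PORT A =====
-- loop body of A: state = (duplicate_uids, seen_uids)
def fduStepA (st : PySem.Dict Int (List String) × PySem.Set Int) (p : String × Int) :
    PySem.Dict Int (List String) × PySem.Set Int :=
  if PySem.Set.contains st.2 p.2 then
    if st.1.contains p.2 = false then (st.1.insert p.2 [p.1], st.2)
    else (st.1.modify p.2 [] (fun l => l ++ [p.1]), st.2)
  else (st.1, PySem.Set.add st.2 p.2)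

def find_duplicate_uids (users : List (String × Int)) : List (Int × List String) :=
  (users.foldl fduStepA (PySem.Dict.empty, PySem.Set.empty)).1.items

-- ===== PORT B =====
-- pass-1 body: first.setdefault(uid, i)
def fduFirstStep (d : PySem.Dict Int Int) (p : Int × (String × Int)) : PySem.Dict Int Int :=
  d.setdefault p.2.2 p.1

-- pass-2 body: if i != first[uid]: dups.setdefault(uid, []).append(user)
-- (first[uid]: the key is always present after pass 1, so getD is exact here)
def fduStepB (first : PySem.Dict Int Int) (d : PySem.Dict Int (List String))
    (p : Int × (String × Int)) : PySem.Dict Int (List String) :=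
  if p.1 ≠ first.getD p.2.2 0 then
    (d.setdefault p.2.2 []).modify p.2.2 [] (fun l => l ++ [p.2.1])
  else d

def find_duplicate_uids_alt (users : List (String × Int)) : List (Int × List String) :=
  let items := PySem.List.enumerate users
  let first := items.foldl fduFirstStep PySem.Dict.empty
  (items.foldl (fduStepB first) PySem.Dict.empty).items

-- ===== PRECONDITION & SPEC =====
def Spec_find_duplicate_uids (users : List (String × Int)) (out : List (Int × List String)) : Prop := out = find_duplicate_uids_alt users
instance (users : List (String × Int)) (out : List (Int × List String)) : Decidable (Spec_find_duplicate_uids users out) := by unfold Spec_find_duplicate_uids; infer_instance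

-- ===== CLAIM (what is proved, stated in full; the proofs are below) =====
def Claim_equal_find_duplicate_uids : Prop := ∀ (users : List (String × Int)), Dom_find_duplicate_uids users → Spec_find_duplicate_uids users (find_duplicate_uids users)

-- ===== LEMMAS AND PROOFS =====

-- Pass 1 computes, for each uid, its first-occurrence index (offset by the start s).
theorem fdu_first_get? (l : List (String × Int)) (s : Int) (d : PySem.Dict Int Int) (u : Int) :
    ((PySem.List.enumerate l s).foldl fduFirstStep d).get? u =
      (d.get? u).or (Option.map (fun k : Nat => s + (k : Int)) (List.findIdx? (fun q : String × Int => q.2 == u) l)) := by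
  induction l generalizing s d with
  | nil => simp [PySem.List.enumerate_nil, Option.or_none]
  | cons x t ih =>
    rw [PySem.List.enumerate_cons, List.foldl_cons, List.findIdx?_cons]
    by_cases hx : x.2 = u
    · have hstep : fduFirstStep d (s, x) = d.setdefault u s := by
        simp [fduFirstStep, hx]
      rw [hstep, ih, if_pos (by simp [hx])]
      rw [PySem.Dict.get?_setdefault_self]
      cases hd : d.get? u <;> simp [Option.or]
    · have hstep : fduFirstStep d (s, x) = d.setdefault x.2 s := rfl
      rw [hstep, ih, if_neg (by simp [hx])]
      rw [PySem.Dict.get?_setdefault_of_ne _ _ (Ne.symm hx)]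
      congr 1
      cases List.findIdx? (fun q : String × Int => q.2 == u) t with
      | none => rfl
      | some k =>
        simp only [Option.map_some]
        congr 1
        push_cast
        ring

-- Boundary fact: the first-occurrence index of uid equals the current position
-- pre.length iff uid did not occur in the prefix pre.
theorem fdu_first_boundary (pre t : List (String × Int)) (user : String) (uid : Int) :
    (((PySem.List.enumerate (pre ++ (user, uid) :: t)).foldl fduFirstStep
        PySem.Dict.empty).getD uid 0 = (pre.length : Int)) ↔ uid ∉ pre.map Prod.snd := by
  have h := fdu_first_get? (pre ++ (user, uid) :: t) 0 PySem.Dict.empty uid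
  rw [List.findIdx?_append, List.findIdx?_cons] at h
  simp only [PySem.Dict.get?_empty, Option.none_or] at h
  cases hf : List.findIdx? (fun q : String × Int => q.2 == uid) pre with
  | none =>
    rw [hf] at h
    simp only [Option.none_or, beq_self_eq_true, if_pos] at h
    have hnot : uid ∉ pre.map Prod.snd := by
      intro hm
      obtain ⟨q, hq, hq2⟩ := List.mem_map.1 hm
      have := List.findIdx?_eq_none_iff.1 hf q hq
      simp [hq2] at this
    simp only [PySem.Dict.getD, h]
    simp [hnot]
  | some m =>
    rw [hf] at h
    have hm := List.findIdx?_eq_some_iff_getElem.1 hf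
    obtain ⟨hlt, hp, _⟩ := hm
    have hin : uid ∈ pre.map Prod.snd := by
      refine List.mem_map.2 ⟨pre[m], List.getElem_mem _, ?_⟩
      simpa using hp
    simp only [Option.some_or, Option.map_some] at h
    simp only [PySem.Dict.getD, h, Option.getD_some]
    have hmlt : (m : Int) < (pre.length : Int) := by exact_mod_cast hlt
    constructor
    · intro he
      exfalso
      omega
    · intro hne
      exact absurd hin hne

-- Main invariant: A's fold over the remaining list equals B's pass-2 fold over the
-- enumerated remaining list, where B's first-index dict is built from the whole list
-- and A's seen-set is exactly the uids of the processed prefix.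
theorem fdu_loop_eq (rest : List (String × Int)) : ∀ (pre : List (String × Int))
    (dA : PySem.Dict Int (List String)) (seen : PySem.Set Int),
    (∀ u : Int, u ∈ seen ↔ u ∈ pre.map Prod.snd) →
    (rest.foldl fduStepA (dA, seen)).1 =
      (PySem.List.enumerate rest (pre.length : Int)).foldl
        (fduStepB ((PySem.List.enumerate (pre ++ rest)).foldl fduFirstStep
          PySem.Dict.empty)) dA := by
  induction rest with
  | nil => intro pre dA seen _; simp [PySem.List.enumerate_nil]
  | cons p t ih =>
    intro pre dA seen hseen
    obtain ⟨user, uid⟩ := p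
    rw [List.foldl_cons, PySem.List.enumerate_cons, List.foldl_cons]
    set first := (PySem.List.enumerate (pre ++ (user, uid) :: t)).foldl fduFirstStep
      PySem.Dict.empty with hfirst
    have hbd := fdu_first_boundary pre t user uid
    rw [← hfirst] at hbd
    have happ : pre ++ (user, uid) :: t = (pre ++ [(user, uid)]) ++ t := by simp
    have hlen : ((pre ++ [(user, uid)]).length : Int) = (pre.length : Int) + 1 := by
      simp
    by_cases hmem : uid ∈ pre.map Prod.snd
    · -- uid already seen: A appends/creates, B's condition holds
      have hA : PySem.Set.contains seen uid = true := by
        simpa [PySem.Set.contains, List.contains_iff_mem] using (hseen uid).2 hmem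
      have hB : (pre.length : Int) ≠ first.getD uid 0 := by
        intro he; exact absurd (hbd.1 he.symm) (by simpa using hmem)
      have hstepB : fduStepB first dA ((pre.length : Int), (user, uid))
          = (dA.setdefault uid []).modify uid [] (fun l => l ++ [user]) := by
        simp [fduStepB, hB]
      have hstepA : fduStepA (dA, seen) (user, uid)
          = ((dA.setdefault uid []).modify uid [] (fun l => l ++ [user]), seen) := by
        simp only [fduStepA]
        rw [hA]
        by_cases hc : dA.contains uid = true
        · rw [PySem.Dict.setdefault_of_contains _ _ hc]
          simp [hc]
        · have hc' : dA.contains uid = false := by simpa using hc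
          rw [if_pos hc', PySem.Dict.setdefault_of_not_contains _ _ hc']
          rw [PySem.Dict.modify, PySem.Dict.getD_insert_self, PySem.Dict.insert_insert_self]
          simp
      rw [hstepA, hstepB]
      have := ih (pre ++ [(user, uid)])
        ((dA.setdefault uid []).modify uid [] (fun l => l ++ [user])) seen
        (by intro u; rw [hseen u]
            simp only [List.map_append, List.mem_append, List.map_cons, List.map_nil,
              List.mem_singleton]
            constructor
            · exact Or.inl
            · rintro (h | h)
              · exact h
              · exact h ▸ hmem)
      rw [hlen, ← happ] at this
      exact this
    · -- first occurrence of uid: A records it, B's condition fails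
      have hA : PySem.Set.contains seen uid = false := by
        rw [Bool.eq_false_iff]
        intro hcon
        exact hmem ((hseen uid).1 (by simpa [PySem.Set.contains, List.contains_iff_mem] using hcon))
      have hB : first.getD uid 0 = (pre.length : Int) := hbd.2 hmem
      have hstepB : fduStepB first dA ((pre.length : Int), (user, uid)) = dA := by
        simp [fduStepB, hB]
      have hstepA : fduStepA (dA, seen) (user, uid) = (dA, PySem.Set.add seen uid) := by
        simp only [fduStepA]; rw [hA]; simp
      rw [hstepA, hstepB]
      have := ih (pre ++ [(user, uid)]) dA (PySem.Set.add seen uid)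
        (by intro u
            rw [PySem.Set.mem_add, hseen u]
            simp only [List.map_append, List.mem_append, List.map_cons, List.map_nil,
              List.mem_singleton]
            try tauto)
      rw [hlen, ← happ] at this
      exact this

-- ===== VERDICT (by name: the statement is the Claim_ definition above) =====
theorem find_duplicate_uids_spec : Claim_equal_find_duplicate_uids := by
  intro users _
  show find_duplicate_uids users = find_duplicate_uids_alt users
  unfold find_duplicate_uids find_duplicate_uids_alt
  have := fdu_loop_eq users [] PySem.Dict.empty PySem.Set.empty
    (by intro u; simp [PySem.Set.empty])
  simp only [List.nil_append, List.length_nil, Int.natCast_zero] at this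
  simp only [this]
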